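-- pv_equiv track=rewrite | github.com/dadalib/mathematical_problems | ch01_intoduction/ch06_mathematical_problems.py | odd_numbers_first
-- ===== SOURCE A (Python) =====
-- def odd_numbers_first(values):
--     odd_array =[]
--     not_odd_array=[]
--     sum_array = []
--
--     for value in values:
--         if value%2 ==0:
--             odd_array.append(value)
--
--         else:
--             not_odd_array.append(value)
--     sum_array = sorted(odd_array) + sorted(not_odd_array)
--     return  sum_array
-- ===== SOURCE B (Python) =====
-- def odd_numbers_first(values):
--     # Sort once up front; then take the even and odd subsequences of the
--     # sorted list by two comprehensions (a subsequence of a sorted list is sorted).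
--     s = sorted(values)
--     return [v for v in s if v % 2 == 0] + [v for v in s if v % 2 != 0]
-- ===== Notes on version B (the rewrite author's own statement) =====
-- stated objective: alternative
-- what changed: A partitions into two accumulator lists via an explicit loop and then sorts each group separately; B sorts the whole list once and then extracts the even and odd subsequences of the sorted list with two filter comprehensions (a subsequence of a sorted list is sorted), so the partition loop and the two sorts disappear.
import Mathlib
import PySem

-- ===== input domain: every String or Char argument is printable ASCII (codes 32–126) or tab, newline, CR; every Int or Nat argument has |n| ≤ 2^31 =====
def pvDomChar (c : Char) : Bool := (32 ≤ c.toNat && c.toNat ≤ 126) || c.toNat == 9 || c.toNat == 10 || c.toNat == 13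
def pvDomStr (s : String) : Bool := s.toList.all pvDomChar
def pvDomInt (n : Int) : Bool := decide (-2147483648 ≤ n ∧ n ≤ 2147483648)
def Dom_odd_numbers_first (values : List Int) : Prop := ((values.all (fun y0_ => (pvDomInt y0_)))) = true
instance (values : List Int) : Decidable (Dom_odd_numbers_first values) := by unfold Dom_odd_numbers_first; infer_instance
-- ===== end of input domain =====

-- B sorts the whole list once and takes the even/odd subsequences of the sorted
-- list by two filters, instead of A's partition loop plus two sorts; same value.

-- ===== PORT A =====
def odd_numbers_first (values : List Int) : List Int :=
  let pair := values.foldl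
    (fun (acc : List Int × List Int) value =>
      if PySem.Int.mod value 2 == 0 then (acc.1 ++ [value], acc.2)
      else (acc.1, acc.2 ++ [value]))
    ([], [])
  PySem.List.sorted pair.1 (fun x => x) false ++ PySem.List.sorted pair.2 (fun x => x) false

-- ===== PORT B =====
def odd_numbers_first_alt (values : List Int) : List Int :=
  let s := PySem.List.sorted values (fun x => x) false
  s.filter (fun v => PySem.Int.mod v 2 == 0) ++ s.filter (fun v => PySem.Int.mod v 2 != 0)

-- ===== PRECONDITION & SPEC =====
def Spec_odd_numbers_first (values : List Int) (out : List Int) : Prop := out = odd_numbers_first_alt values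
instance (values : List Int) (out : List Int) : Decidable (Spec_odd_numbers_first values out) := by unfold Spec_odd_numbers_first; infer_instance

-- ===== CLAIM (what is proved, stated in full; the proofs are below) =====
def Claim_equal_odd_numbers_first : Prop := ∀ (values : List Int), Dom_odd_numbers_first values → Spec_odd_numbers_first values (odd_numbers_first values)

-- ===== LEMMAS AND PROOFS =====

-- A's partition fold computes the two filters, appended to the accumulators
theorem part_foldl (p : Int → Bool) (l : List Int) (a b : List Int) :
    l.foldl (fun (acc : List Int × List Int) v =>
      if p v then (acc.1 ++ [v], acc.2) else (acc.1, acc.2 ++ [v])) (a, b)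
    = (a ++ l.filter p, b ++ l.filter (fun v => !p v)) := by
  induction l generalizing a b with
  | nil => simp
  | cons x xs ih =>
    by_cases h : p x = true <;> simp [List.foldl_cons, h, ih]

-- sorting a filtered list = filtering the sorted list
theorem sorted_filter (p : Int → Bool) (l : List Int) :
    PySem.List.sorted (l.filter p) (fun x => x) false
      = (PySem.List.sorted l (fun x => x) false).filter p := by
  apply PySem.List.sorted_id_eq_of_perm_of_pairwise
  · exact (PySem.List.sorted_perm l _ false).filter p
  · exact (PySem.List.sorted_pairwise l (fun x => x)).filter p

-- ===== VERDICT (by name: the statement is the Claim_ definition above) =====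
theorem odd_numbers_first_spec : Claim_equal_odd_numbers_first := by
  intro values _
  unfold Spec_odd_numbers_first odd_numbers_first odd_numbers_first_alt
  simp only [part_foldl, List.nil_append, sorted_filter]
  have hp : ∀ v : Int, (!(PySem.Int.mod v 2 == 0)) = (PySem.Int.mod v 2 != 0) := fun v => rfl
  simp only [hp]
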